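-- pv_equiv track=rewrite | github.com/busy1buddy/hydraulic-analysis-tool | reports/pdf_report.py | _build_conclusions
-- ===== SOURCE A (Python) =====
-- def _collect_compliance(results):
--     items = []
--     for key in ('steady_state', 'transient', 'fire_flow', 'water_quality'):
--         sub = results.get(key)
--         if sub and 'compliance' in sub:
--             items.extend(sub['compliance'])
--     return items
--
-- def _build_conclusions(results):
--     paragraphs = []
--     all_compliance = _collect_compliance(results)
--
--     ok_count = sum(1 for c in all_compliance if c.get('type') == 'OK')
--     warn_count = sum(1 for c in all_compliance if c.get('type') == 'WARNING')
--     crit_count = sum(1 for c in all_compliance if c.get('type') == 'CRITICAL')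
--
--     if crit_count:
--         paragraphs.append(
--             f'CRITICAL: {crit_count} critical issue(s) were identified that '
--             f'require immediate engineering attention before the network can be '
--             f'considered compliant with WSAA guidelines.'
--         )
--     if warn_count:
--         paragraphs.append(
--             f'{warn_count} warning(s) were identified. These should be reviewed '
--             f'and addressed where practicable to improve network performance.'
--         )
--     if ok_count and not crit_count and not warn_count:
--         paragraphs.append(
--             'All analyses passed compliance checks. The network meets '
--             'WSAA guideline requirements for the scenarios tested.'
--         )
--     if not paragraphs:
--         paragraphs.append(
--             'Analysis complete. Review the detailed results in the '
--             'preceding sections for engineering assessment.'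
--         )
--     return paragraphs
-- ===== SOURCE B (Python) =====
-- _KEYS = ('steady_state', 'transient', 'fire_flow', 'water_quality')
--
--
-- def _tally_compliance(results):
--     """Single fused pass: walk the four sections and tally severities directly,
--     never materialising the combined compliance list."""
--     ok = warn = crit = 0
--     for key in _KEYS:
--         sub = results.get(key)
--         if not sub or 'compliance' not in sub:
--             continue
--         for c in sub['compliance']:
--             t = c.get('type')
--             if t == 'OK':
--                 ok += 1
--             elif t == 'WARNING':
--                 warn += 1
--             elif t == 'CRITICAL':
--                 crit += 1
--     return ok, warn, crit
--
--
-- def _build_conclusions(results):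
--     ok, warn, crit = _tally_compliance(results)
--     if crit == 0 and warn == 0:
--         # nothing problematic: exactly one summary paragraph
--         if ok:
--             return ['All analyses passed compliance checks. The network meets '
--                     'WSAA guideline requirements for the scenarios tested.']
--         return ['Analysis complete. Review the detailed results in the '
--                 'preceding sections for engineering assessment.']
--     paragraphs = []
--     if crit:
--         paragraphs.append(
--             f'CRITICAL: {crit} critical issue(s) were identified that '
--             f'require immediate engineering attention before the network can be '
--             f'considered compliant with WSAA guidelines.'
--         )
--     if warn:
--         paragraphs.append(
--             f'{warn} warning(s) were identified. These should be reviewed '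
--             f'and addressed where practicable to improve network performance.'
--         )
--     return paragraphs
-- ===== Notes on version B (the rewrite author's own statement) =====
-- stated objective: alternative
-- what changed: B never builds the combined compliance list or makes three counting scans: a single fused pass over the four sections tallies OK/WARNING/CRITICAL into a triple accumulator, and the paragraph logic becomes an early-return case split (clean case returns exactly one summary paragraph; otherwise only the issue paragraphs are appended, with no reachable default branch).
import Mathlib
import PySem

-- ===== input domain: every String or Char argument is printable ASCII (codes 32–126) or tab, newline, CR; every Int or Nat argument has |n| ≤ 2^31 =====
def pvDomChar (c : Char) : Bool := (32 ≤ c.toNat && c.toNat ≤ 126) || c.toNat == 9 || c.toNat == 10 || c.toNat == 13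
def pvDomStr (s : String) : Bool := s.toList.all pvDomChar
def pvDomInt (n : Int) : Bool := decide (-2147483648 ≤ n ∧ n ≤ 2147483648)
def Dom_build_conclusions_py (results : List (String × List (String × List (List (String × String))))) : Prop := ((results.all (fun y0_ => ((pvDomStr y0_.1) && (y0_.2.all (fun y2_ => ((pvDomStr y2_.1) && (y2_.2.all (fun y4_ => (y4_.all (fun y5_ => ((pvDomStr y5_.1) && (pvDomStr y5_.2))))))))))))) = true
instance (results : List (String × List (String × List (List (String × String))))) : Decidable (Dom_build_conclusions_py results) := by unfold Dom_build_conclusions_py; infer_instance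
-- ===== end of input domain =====

-- B fuses collection and counting into ONE pass with a (ok, warn, crit) triple accumulator
-- (no intermediate compliance list) and rebuilds the paragraphs by an early-return case
-- split instead of A's sequential appends with a default fallback (alternative decomposition).


-- message texts shared by both ports (the ports concatenate them exactly as the Pythons do)
def pvCritMsg (n : Int) : String :=
  "CRITICAL: " ++ PySem.Int.toStr n ++ " critical issue(s) were identified that require immediate engineering attention before the network can be considered compliant with WSAA guidelines."
def pvWarnMsg (n : Int) : String :=
  PySem.Int.toStr n ++ " warning(s) were identified. These should be reviewed and addressed where practicable to improve network performance."
def pvOkMsg : String :=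
  "All analyses passed compliance checks. The network meets WSAA guideline requirements for the scenarios tested."
def pvDefaultMsg : String :=
  "Analysis complete. Review the detailed results in the preceding sections for engineering assessment."

-- ===== PORT A =====
-- _collect_compliance: loop over the four keys, extending an accumulator list
def pv_collect_compliance (results : List (String × List (String × List (List (String × String))))) : List (List (String × String)) :=
  ["steady_state", "transient", "fire_flow", "water_quality"].foldl
    (fun items key =>
      match (PySem.Dict.mk results).get? key with
      | some sub =>
          if !sub.isEmpty && (PySem.Dict.mk sub).contains "compliance" then
            items ++ (PySem.Dict.mk sub).getD "compliance" []
          else items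
      | none => items) []

def build_conclusions_py (results : List (String × List (String × List (List (String × String))))) : List String :=
  let all_compliance := pv_collect_compliance results
  -- three separate sum(1 for c in all_compliance if c.get('type') == …) passes
  let ok_count : Int := all_compliance.foldl
    (fun acc c => if (PySem.Dict.mk c).get? "type" == some "OK" then acc + 1 else acc) 0
  let warn_count : Int := all_compliance.foldl
    (fun acc c => if (PySem.Dict.mk c).get? "type" == some "WARNING" then acc + 1 else acc) 0
  let crit_count : Int := all_compliance.foldl
    (fun acc c => if (PySem.Dict.mk c).get? "type" == some "CRITICAL" then acc + 1 else acc) 0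
  let paragraphs : List String := []
  let paragraphs := if crit_count ≠ 0 then paragraphs ++ [pvCritMsg crit_count] else paragraphs
  let paragraphs := if warn_count ≠ 0 then paragraphs ++ [pvWarnMsg warn_count] else paragraphs
  let paragraphs := if ok_count ≠ 0 ∧ crit_count = 0 ∧ warn_count = 0 then paragraphs ++ [pvOkMsg] else paragraphs
  if paragraphs.isEmpty then paragraphs ++ [pvDefaultMsg] else paragraphs

-- ===== PORT B =====
-- _tally_compliance: ONE fused pass over the four sections, tallying severities
-- into an (ok, warn, crit) triple; the combined list is never materialised
-- loop body of the inner 'for c in sub[\'compliance\']' tally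
def pv_step (a : Int × Int × Int) (c : List (String × String)) : Int × Int × Int :=
  let t := (PySem.Dict.mk c).get? "type"
  if t == some "OK" then (a.1 + 1, a.2.1, a.2.2)
  else if t == some "WARNING" then (a.1, a.2.1 + 1, a.2.2)
  else if t == some "CRITICAL" then (a.1, a.2.1, a.2.2 + 1)
  else a

def pv_tally_compliance (results : List (String × List (String × List (List (String × String))))) : Int × Int × Int :=
  ["steady_state", "transient", "fire_flow", "water_quality"].foldl
    (fun acc key =>
      match (PySem.Dict.mk results).get? key with
      | some sub =>
          -- 'if not sub or "compliance" not in sub: continue'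
          if !sub.isEmpty && (PySem.Dict.mk sub).contains "compliance" then
            ((PySem.Dict.mk sub).getD "compliance" []).foldl pv_step acc
          else acc
      | none => acc) (0, 0, 0)

def build_conclusions_py_alt (results : List (String × List (String × List (List (String × String))))) : List String :=
  let t := pv_tally_compliance results
  let ok := t.1
  let warn := t.2.1
  let crit := t.2.2
  if crit = 0 ∧ warn = 0 then
    -- clean case: exactly one summary paragraph, returned early
    if ok ≠ 0 then [pvOkMsg] else [pvDefaultMsg]
  else
    (if crit ≠ 0 then [pvCritMsg crit] else [])
      ++ (if warn ≠ 0 then [pvWarnMsg warn] else [])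

-- ===== PRECONDITION & SPEC =====
def Spec_build_conclusions_py (results : List (String × List (String × List (List (String × String))))) (out : List String) : Prop := out = build_conclusions_py_alt results
instance (results : List (String × List (String × List (List (String × String))))) (out : List String) : Decidable (Spec_build_conclusions_py results out) := by unfold Spec_build_conclusions_py; infer_instance

-- ===== CLAIM (what is proved, stated in full; the proofs are below) =====
def Claim_equal_build_conclusions_py : Prop := ∀ (results : List (String × List (String × List (List (String × String))))), Dom_build_conclusions_py results → Spec_build_conclusions_py results (build_conclusions_py results)

-- ===== LEMMAS AND PROOFS =====

-- A's counting scan from an arbitrary start equals start + countP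
theorem pv_foldl_count (p : List (String × String) → Bool) :
    ∀ (L : List (List (String × String))) (a : Int),
      L.foldl (fun acc c => if p c then acc + 1 else acc) a = a + L.countP p := by
  intro L
  induction L with
  | nil => intro a; simp
  | cons c t ih =>
    intro a
    by_cases h : p c = true
    · simp [h, ih]; push_cast; ring
    · simp [h, ih]

-- one pv_step adds the three indicator values componentwise
theorem pv_step_eq (a : Int × Int × Int) (c : List (String × String)) :
    pv_step a c =
      (a.1 + (if (PySem.Dict.mk c).get? "type" == some "OK" then 1 else 0),
       a.2.1 + (if (PySem.Dict.mk c).get? "type" == some "WARNING" then 1 else 0),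
       a.2.2 + (if (PySem.Dict.mk c).get? "type" == some "CRITICAL" then 1 else 0)) := by
  unfold pv_step
  by_cases h1 : (PySem.Dict.mk c).get? "type" = some "OK"
  · simp [h1]
  · by_cases h2 : (PySem.Dict.mk c).get? "type" = some "WARNING"
    · simp [h2]
    · by_cases h3 : (PySem.Dict.mk c).get? "type" = some "CRITICAL"
      · simp [h3]
      · simp [h1, h2, h3]

-- the inner tally over one compliance list adds the three counts componentwise
theorem pv_inner_tally (L : List (List (String × String))) :
    ∀ (a : Int × Int × Int),
      L.foldl pv_step a
      = (a.1 + L.countP (fun c => (PySem.Dict.mk c).get? "type" == some "OK"),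
         a.2.1 + L.countP (fun c => (PySem.Dict.mk c).get? "type" == some "WARNING"),
         a.2.2 + L.countP (fun c => (PySem.Dict.mk c).get? "type" == some "CRITICAL")) := by
  induction L with
  | nil => intro a; simp
  | cons c t ih =>
    intro a
    rw [List.foldl_cons, ih, pv_step_eq]
    simp only [List.countP_cons, Prod.mk.injEq]
    refine ⟨?_, ?_, ?_⟩ <;> (push_cast; split_ifs <;> omega)

-- B's fused outer fold equals the three counts of A's collected list
theorem pv_tally_eq_counts (results : List (String × List (String × List (List (String × String))))) :
    pv_tally_compliance results
      = (((pv_collect_compliance results).countP (fun c => (PySem.Dict.mk c).get? "type" == some "OK") : Int),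
         ((pv_collect_compliance results).countP (fun c => (PySem.Dict.mk c).get? "type" == some "WARNING") : Int),
         ((pv_collect_compliance results).countP (fun c => (PySem.Dict.mk c).get? "type" == some "CRITICAL") : Int)) := by
  unfold pv_tally_compliance pv_collect_compliance
  generalize ["steady_state", "transient", "fire_flow", "water_quality"] = keys
  suffices h : ∀ (keys : List String) (acc : List (List (String × String))) (a : Int × Int × Int),
      a = ((acc.countP (fun c => (PySem.Dict.mk c).get? "type" == some "OK") : Int),
           (acc.countP (fun c => (PySem.Dict.mk c).get? "type" == some "WARNING") : Int),
           (acc.countP (fun c => (PySem.Dict.mk c).get? "type" == some "CRITICAL") : Int)) →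
      keys.foldl
        (fun acc key =>
          match (PySem.Dict.mk results).get? key with
          | some sub =>
              if !sub.isEmpty && (PySem.Dict.mk sub).contains "compliance" then
                ((PySem.Dict.mk sub).getD "compliance" []).foldl pv_step acc
              else acc
          | none => acc) a
      = (let L := keys.foldl
          (fun items key =>
            match (PySem.Dict.mk results).get? key with
            | some sub =>
                if !sub.isEmpty && (PySem.Dict.mk sub).contains "compliance" then
                  items ++ (PySem.Dict.mk sub).getD "compliance" []
                else items
            | none => items) acc
         ((L.countP (fun c => (PySem.Dict.mk c).get? "type" == some "OK") : Int),
          (L.countP (fun c => (PySem.Dict.mk c).get? "type" == some "WARNING") : Int),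
          (L.countP (fun c => (PySem.Dict.mk c).get? "type" == some "CRITICAL") : Int))) by
    exact h keys [] (0, 0, 0) (by simp)
  clear keys
  intro keys
  induction keys with
  | nil => intro acc a ha; simpa using ha
  | cons k t ih =>
    intro acc a ha
    simp only [List.foldl_cons]
    cases hk : (PySem.Dict.mk results).get? k with
    | none => exact ih acc a ha
    | some sub =>
      dsimp only
      by_cases hg : (!sub.isEmpty && (PySem.Dict.mk sub).contains "compliance") = true
      · rw [if_pos hg, if_pos hg]
        apply ih
        rw [pv_inner_tally, ha]
        simp only [List.countP_append, Prod.mk.injEq]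
        refine ⟨?_, ?_, ?_⟩ <;> push_cast <;> ring
      · rw [if_neg hg, if_neg hg]
        exact ih acc a ha

-- the paragraph assembly: A's append chain with counts o,w,c equals B's early-return split
theorem pv_tail_eq (o w c : Int) :
    (let paragraphs : List String := []
     let paragraphs := if c ≠ 0 then paragraphs ++ [pvCritMsg c] else paragraphs
     let paragraphs := if w ≠ 0 then paragraphs ++ [pvWarnMsg w] else paragraphs
     let paragraphs := if o ≠ 0 ∧ c = 0 ∧ w = 0 then paragraphs ++ [pvOkMsg] else paragraphs
     if paragraphs.isEmpty then paragraphs ++ [pvDefaultMsg] else paragraphs) =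
    (if c = 0 ∧ w = 0 then
       if o ≠ 0 then [pvOkMsg] else [pvDefaultMsg]
     else
       (if c ≠ 0 then [pvCritMsg c] else []) ++ (if w ≠ 0 then [pvWarnMsg w] else [])) := by
  by_cases hc : c = 0 <;> by_cases hw : w = 0 <;> by_cases ho : o = 0 <;>
    simp [hc, hw, ho]

-- ===== VERDICT (by name: the statement is the Claim_ definition above) =====
theorem build_conclusions_py_spec : Claim_equal_build_conclusions_py := by
  intro results _
  show build_conclusions_py results = build_conclusions_py_alt results
  unfold build_conclusions_py build_conclusions_py_alt
  rw [pv_tally_eq_counts]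
  simp only [pv_foldl_count, zero_add]
  exact pv_tail_eq _ _ _
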